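-- pv_equiv track=rewrite | github.com/arnab-alt/Jobify | utils/search_helper.py | get_skill_variations
-- ===== SOURCE A (Python) =====
-- def get_skill_variations(skill):
--     """
--     Get variations of a skill name for better matching
--     """
--     skill_lower = skill.lower().strip()
--
--     variations_map = {
--         'javascript': ['js', 'javascript', 'java script'],
--         'js': ['js', 'javascript'],
--         'typescript': ['ts', 'typescript'],
--         'ts': ['ts', 'typescript'],
--         'reactjs': ['react', 'reactjs', 'react.js'],
--         'react': ['react', 'reactjs', 'react.js'],
--         'angular': ['angular', 'angularjs', 'angular.js'],
--         'vuejs': ['vue', 'vuejs', 'vue.js'],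
--         'vue': ['vue', 'vuejs', 'vue.js'],
--         'nodejs': ['node', 'nodejs', 'node.js'],
--         'node': ['node', 'nodejs', 'node.js'],
--         'node.js': ['node', 'nodejs', 'node.js'],
--         'python': ['python', 'py'],
--         'py': ['python', 'py'],
--         'machine learning': ['ml', 'machine learning', 'machinelearning'],
--         'ml': ['ml', 'machine learning'],
--         'artificial intelligence': ['ai', 'artificial intelligence'],
--         'ai': ['ai', 'artificial intelligence'],
--         'amazon web services': ['aws', 'amazon web services'],
--         'aws': ['aws', 'amazon web services'],
--         'google cloud platform': ['gcp', 'google cloud'],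
--         'gcp': ['gcp', 'google cloud platform', 'google cloud'],
--         'microsoft azure': ['azure', 'microsoft azure'],
--         'azure': ['azure', 'microsoft azure'],
--         'kubernetes': ['k8s', 'kubernetes'],
--         'k8s': ['k8s', 'kubernetes'],
--         'c++': ['cpp', 'c++', 'cplusplus'],
--         'c#': ['csharp', 'c#'],
--         'postgresql': ['postgres', 'postgresql'],
--         'postgres': ['postgres', 'postgresql'],
--     }
--
--     for key, values in variations_map.items():
--         if skill_lower in values or skill_lower == key:
--             return values
--
--     return [skill_lower]
-- ===== SOURCE B (Python) =====
-- # Reverse-lookup index built from disjoint variation groups: every member of a group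
-- # triggers that group's list (plus the one alias 'google cloud platform'); a call is
-- # one dict lookup instead of A's scan over the forward map.
-- _GROUPS = [
--     ['js', 'javascript', 'java script'],
--     ['ts', 'typescript'],
--     ['react', 'reactjs', 'react.js'],
--     ['angular', 'angularjs', 'angular.js'],
--     ['vue', 'vuejs', 'vue.js'],
--     ['node', 'nodejs', 'node.js'],
--     ['python', 'py'],
--     ['ml', 'machine learning', 'machinelearning'],
--     ['ai', 'artificial intelligence'],
--     ['aws', 'amazon web services'],
--     ['gcp', 'google cloud'],
--     ['azure', 'microsoft azure'],
--     ['k8s', 'kubernetes'],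
--     ['cpp', 'c++', 'cplusplus'],
--     ['csharp', 'c#'],
--     ['postgres', 'postgresql'],
-- ]
--
-- _REVERSE = {trigger: group for group in _GROUPS for trigger in group}
-- _REVERSE['google cloud platform'] = _GROUPS[10]
--
-- def get_skill_variations(skill):
--     """
--     Get variations of a skill name for better matching
--     """
--     skill_lower = skill.lower().strip()
--     return _REVERSE.get(skill_lower, [skill_lower])
-- ===== Notes on version B (the rewrite author's own statement) =====
-- stated objective: alternative
-- what changed: Replaces A's per-call linear scan over the forward variations map with a precomputed reverse-lookup dict (each trigger string maps directly to its variation list, first occurrence wins), so each call is one dict lookup instead of a scan.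
import Mathlib
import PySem

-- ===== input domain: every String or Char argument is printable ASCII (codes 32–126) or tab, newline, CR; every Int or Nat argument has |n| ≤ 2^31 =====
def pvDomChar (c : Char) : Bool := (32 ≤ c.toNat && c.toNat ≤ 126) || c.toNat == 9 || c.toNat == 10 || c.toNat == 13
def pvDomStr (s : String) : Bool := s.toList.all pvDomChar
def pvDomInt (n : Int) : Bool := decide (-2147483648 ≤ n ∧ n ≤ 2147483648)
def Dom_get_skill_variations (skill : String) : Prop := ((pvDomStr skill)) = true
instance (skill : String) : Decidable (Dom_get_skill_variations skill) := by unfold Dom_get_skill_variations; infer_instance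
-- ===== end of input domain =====

-- B replaces A's per-call scan of the forward variations map by a reverse-lookup dict
-- built once from disjoint variation groups (each member triggers its group); one lookup per call
-- (objective: alternative).

-- ===== PORT A =====
def pvVariationsMap : List (String × List String) :=
  [ ("javascript", ["js", "javascript", "java script"]),
    ("js", ["js", "javascript"]),
    ("typescript", ["ts", "typescript"]),
    ("ts", ["ts", "typescript"]),
    ("reactjs", ["react", "reactjs", "react.js"]),
    ("react", ["react", "reactjs", "react.js"]),
    ("angular", ["angular", "angularjs", "angular.js"]),
    ("vuejs", ["vue", "vuejs", "vue.js"]),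
    ("vue", ["vue", "vuejs", "vue.js"]),
    ("nodejs", ["node", "nodejs", "node.js"]),
    ("node", ["node", "nodejs", "node.js"]),
    ("node.js", ["node", "nodejs", "node.js"]),
    ("python", ["python", "py"]),
    ("py", ["python", "py"]),
    ("machine learning", ["ml", "machine learning", "machinelearning"]),
    ("ml", ["ml", "machine learning"]),
    ("artificial intelligence", ["ai", "artificial intelligence"]),
    ("ai", ["ai", "artificial intelligence"]),
    ("amazon web services", ["aws", "amazon web services"]),
    ("aws", ["aws", "amazon web services"]),
    ("google cloud platform", ["gcp", "google cloud"]),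
    ("gcp", ["gcp", "google cloud platform", "google cloud"]),
    ("microsoft azure", ["azure", "microsoft azure"]),
    ("azure", ["azure", "microsoft azure"]),
    ("kubernetes", ["k8s", "kubernetes"]),
    ("k8s", ["k8s", "kubernetes"]),
    ("c++", ["cpp", "c++", "cplusplus"]),
    ("c#", ["csharp", "c#"]),
    ("postgresql", ["postgres", "postgresql"]),
    ("postgres", ["postgres", "postgresql"]) ]

-- A's 'for key, values in variations_map.items(): if skill_lower in values or skill_lower == key: return values'
def pvScanA (sl : String) : List (String × List String) → List String
  | [] => [sl]
  | (k, vs) :: rest => if vs.contains sl || sl == k then vs else pvScanA sl rest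

def get_skill_variations (skill : String) : List String :=
  let skill_lower := PySem.Str.strip (PySem.Str.lower skill)
  pvScanA skill_lower pvVariationsMap

-- ===== PORT B =====
-- Source B's _GROUPS: disjoint variation groups; each member triggers its own group
def pvGroups : List (List String) :=
  [ ["js", "javascript", "java script"],
    ["ts", "typescript"],
    ["react", "reactjs", "react.js"],
    ["angular", "angularjs", "angular.js"],
    ["vue", "vuejs", "vue.js"],
    ["node", "nodejs", "node.js"],
    ["python", "py"],
    ["ml", "machine learning", "machinelearning"],
    ["ai", "artificial intelligence"],
    ["aws", "amazon web services"],
    ["gcp", "google cloud"],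
    ["azure", "microsoft azure"],
    ["k8s", "kubernetes"],
    ["cpp", "c++", "cplusplus"],
    ["csharp", "c#"],
    ["postgres", "postgresql"] ]

-- Source B's dict comprehension over _GROUPS, then the one extra alias entry
def pvReverse : PySem.Dict String (List String) :=
  (pvGroups.foldl (fun d group => group.foldl (fun d trigger => d.insert trigger group) d)
      PySem.Dict.empty).insert "google cloud platform" (pvGroups.getD 10 [])

def get_skill_variations_alt (skill : String) : List String :=
  let skill_lower := PySem.Str.strip (PySem.Str.lower skill)
  (pvReverse.get? skill_lower).getD [skill_lower]

-- ===== PRECONDITION & SPEC =====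
def Spec_get_skill_variations (skill : String) (out : List String) : Prop := out = get_skill_variations_alt skill
instance (skill : String) (out : List String) : Decidable (Spec_get_skill_variations skill out) := by unfold Spec_get_skill_variations; infer_instance

-- ===== CLAIM =====
def Claim_equal_get_skill_variations : Prop := ∀ (skill : String), Dom_get_skill_variations skill → Spec_get_skill_variations skill (get_skill_variations skill)

-- ===== LEMMAS AND PROOFS =====

-- proof-only model of a first-wins reverse build from A's map
def pvRegisterEntry (d : PySem.Dict String (List String)) (kv : String × List String) :
    PySem.Dict String (List String) :=
  (kv.1 :: kv.2).foldl (fun d t => if d.contains t then d else d.insert t kv.2) d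

def pvBuildReverse (m : List (String × List String))
    (d : PySem.Dict String (List String)) : PySem.Dict String (List String) :=
  m.foldl pvRegisterEntry d

-- lookup after the inner trigger loop of one entry
theorem pv_get_triggerFold (ts : List String) (d : PySem.Dict String (List String))
    (vs : List String) (s : String) :
    (ts.foldl (fun d t => if d.contains t then d else d.insert t vs) d).get? s =
      if d.contains s = false ∧ s ∈ ts then some vs else d.get? s := by
  induction ts generalizing d with
  | nil => simp
  | cons t rest ih =>
    rw [List.foldl_cons, ih]
    by_cases hc : d.contains t
    · simp only [hc, if_true]
      by_cases hs : s = t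
      · subst hs
        simp [hc]
      · simp [hs]
    · simp only [hc, Bool.false_eq_true, if_false]
      by_cases hs : s = t
      · subst hs
        simp [PySem.Dict.contains_insert_self, PySem.Dict.get?_insert_self, hc]
      · rw [PySem.Dict.get?_insert_of_ne (hne := hs)]
        simp [PySem.Dict.contains_insert, hs]

-- a key already present survives the rest of the build
theorem pv_get_build_preserve (m : List (String × List String))
    (d : PySem.Dict String (List String)) (s : String) (v : List String)
    (h : d.get? s = some v) :
    (pvBuildReverse m d).get? s = some v := by
  induction m generalizing d with
  | nil => exact h
  | cons kv rest ih =>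
    show (pvBuildReverse rest (pvRegisterEntry d kv)).get? s = some v
    apply ih
    unfold pvRegisterEntry
    rw [pv_get_triggerFold]
    have hc : d.contains s = true := by
      rw [PySem.Dict.contains_eq_isSome_get?, h]; rfl
    simp [hc, h]

-- A's scan equals lookup in the dict built from the remaining entries
theorem pv_scan_eq_build (m : List (String × List String))
    (d : PySem.Dict String (List String)) (s : String)
    (h : d.get? s = none) :
    pvScanA s m = ((pvBuildReverse m d).get? s).getD [s] := by
  induction m generalizing d with
  | nil => simp [pvScanA, pvBuildReverse, h]
  | cons kv rest ih =>
    obtain ⟨k, vs⟩ := kv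
    have hc : d.contains s = false := by
      rw [PySem.Dict.contains_eq_isSome_get?, h]; rfl
    show (if vs.contains s || s == k then vs else pvScanA s rest) =
      ((pvBuildReverse rest (pvRegisterEntry d (k, vs))).get? s).getD [s]
    by_cases hm : vs.contains s || s == k
    · have hmem : s ∈ k :: vs := by
        rcases Bool.or_eq_true _ _ |>.mp hm with h1 | h1
        · exact List.mem_cons_of_mem _ (List.contains_iff_mem.mp h1)
        · exact (beq_iff_eq.mp h1) ▸ List.mem_cons_self
      have hsome : (pvRegisterEntry d (k, vs)).get? s = some vs := by
        unfold pvRegisterEntry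
        rw [pv_get_triggerFold]; simp [hc, hmem]
      rw [if_pos hm, pv_get_build_preserve rest _ s vs hsome]
      rfl
    · have hnmem : s ∉ k :: vs := by
        simp only [Bool.or_eq_true, not_or] at hm
        intro hin
        rcases List.mem_cons.mp hin with h1 | h1
        · exact hm.2 (by simp [h1])
        · exact hm.1 (List.contains_iff_mem.mpr h1)
      have hnone : (pvRegisterEntry d (k, vs)).get? s = none := by
        unfold pvRegisterEntry
        rw [pv_get_triggerFold]; simp [hnmem, h]
      rw [if_neg hm, ih _ hnone]

-- lookups agree in two Nodup-key dicts whose item lists are permutations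
theorem pv_get_eq_of_perm (d1 d2 : PySem.Dict String (List String))
    (h2 : d2.keys.Nodup) (hp : d1.items.Perm d2.items) (s : String) :
    d1.get? s = d2.get? s := by
  cases h : d1.get? s with
  | some v =>
    have hm1 : (s, v) ∈ d1.items := PySem.Dict.mem_items_of_get?_eq_some (d := d1) h
    exact (PySem.Dict.get?_of_mem_items d2 (hp.mem_iff.mp hm1) h2).symm
  | none =>
    rw [PySem.Dict.get?_eq_none_iff_not_mem_keys] at h
    symm
    rw [PySem.Dict.get?_eq_none_iff_not_mem_keys]
    intro hk
    exact h ((List.Perm.mem_iff (hp.map Prod.fst)).mpr hk)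

set_option maxRecDepth 8000 in
theorem pv_build_keys_nodup : (pvBuildReverse pvVariationsMap PySem.Dict.empty).keys.Nodup := by
  decide

set_option maxRecDepth 8000 in
theorem pv_items_perm :
    pvReverse.items.Perm (pvBuildReverse pvVariationsMap PySem.Dict.empty).items := by
  decide

-- B's reverse dict answers every lookup like a first-wins build from A's map
theorem pv_reverse_get_eq (s : String) :
    pvReverse.get? s = (pvBuildReverse pvVariationsMap PySem.Dict.empty).get? s :=
  pv_get_eq_of_perm _ _ pv_build_keys_nodup pv_items_perm s

-- ===== VERDICT =====
theorem get_skill_variations_spec : Claim_equal_get_skill_variations := by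
  intro skill _
  unfold Spec_get_skill_variations get_skill_variations get_skill_variations_alt
  show pvScanA _ pvVariationsMap = _
  rw [pv_scan_eq_build pvVariationsMap PySem.Dict.empty _ (by simp), ← pv_reverse_get_eq]
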